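-- pv_equiv track=rewrite | github.com/SYANiDE-/SLAE-32 | EXAM/0x6_create_three_polymorphic/ascii2hex.py | byte_it
-- ===== SOURCE A (Python) =====
-- def byte_it(inp):
-- 	a=""
-- 	b=len(inp)
-- 	c=0
-- 	while c < b:
-- 		a += "\\x%s" % inp[0:2]
-- 		inp = inp[2:]
-- 		c += 2
-- 	return a
-- ===== SOURCE B (Python) =====
-- def byte_it(inp):
--     a = ""
--     for i, ch in enumerate(inp):
--         if i % 2 == 0:
--             a += "\\x"
--         a += ch
--     return a
-- ===== Notes on version B (the rewrite author's own statement) =====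
-- stated objective: faster
-- what changed: B makes one pass over individual characters with enumerate, prepending "\x" at each even index, instead of A's while loop that repeatedly slices off 2-char chunks (each inp = inp[2:] copies the whole remaining string).
import Mathlib
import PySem

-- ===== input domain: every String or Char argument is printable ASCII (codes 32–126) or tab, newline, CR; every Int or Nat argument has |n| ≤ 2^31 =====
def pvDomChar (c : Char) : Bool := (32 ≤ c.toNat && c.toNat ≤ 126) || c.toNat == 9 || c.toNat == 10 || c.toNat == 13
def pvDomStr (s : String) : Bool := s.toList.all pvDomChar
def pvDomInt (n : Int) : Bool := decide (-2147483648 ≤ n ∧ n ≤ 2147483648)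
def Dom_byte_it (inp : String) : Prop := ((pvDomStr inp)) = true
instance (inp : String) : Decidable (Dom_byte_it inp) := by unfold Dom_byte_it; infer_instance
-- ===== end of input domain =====

-- B iterates per character with enumerate and a parity test instead of repeatedly slicing off 2-char chunks (which copies the remaining string each step); objective: faster (measured).

-- ===== PORT A =====
-- while loop of A: state (a, inp, c), loop while c < b; inp[0:2] and inp[2:] via PySem slices
def byte_itLoop (b : Int) (a : String) (inp : List Char) (c : Int) : String :=
  if c < b then
    byte_itLoop b (a ++ ("\\x" ++ String.ofList (PySem.List.slice inp (some 0) (some 2))))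
      (PySem.List.slice inp (some 2) none) (c + 2)
  else a
termination_by (b - c).toNat
decreasing_by omega

def byte_it (inp : String) : String :=
  byte_itLoop (inp.toList.length : Int) "" inp.toList 0

-- ===== PORT B =====
def byte_it_alt (inp : String) : String :=
  (PySem.List.enumerate inp.toList 0).foldl
    (fun a p => (if p.1 % 2 == 0 then a ++ "\\x" else a) ++ String.ofList [p.2]) ""

-- ===== PRECONDITION & SPEC =====
def Spec_byte_it (inp : String) (out : String) : Prop := out = byte_it_alt inp
instance (inp : String) (out : String) : Decidable (Spec_byte_it inp out) := by unfold Spec_byte_it; infer_instance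

-- ===== CLAIM (what is proved, stated in full; the proofs are below) =====
def Claim_equal_byte_it : Prop := ∀ (inp : String), Dom_byte_it inp → Spec_byte_it inp (byte_it inp)

-- ===== LEMMAS AND PROOFS =====

-- common reference form: consume the list two characters at a time
def pvChunks : List Char → String → String
  | [], a => a
  | x :: rest, a => pvChunks (rest.drop 1) (a ++ "\\x" ++ String.ofList (x :: rest.take 1))
termination_by l => l.length
decreasing_by simp

theorem loop_eq_chunks (l : List Char) (a : String) : ∀ (b c : Int),
    (l.length : Int) = max (b - c) 0 → byte_itLoop b a l c = pvChunks l a := by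
  induction l, a using pvChunks.induct with
  | case1 a =>
      intro b c h
      simp at h
      rw [byte_itLoop, if_neg (by omega), pvChunks]
  | case2 x rest a ih =>
      intro b c h
      have hcb : c < b := by simp at h; omega
      rw [byte_itLoop, if_pos hcb]
      have h2 : PySem.List.slice (x :: rest) (some 0) (some 2) = x :: rest.take 1 := by
        cases rest <;> simp [PySem.List.slice]
      have h3 : PySem.List.slice (x :: rest) (some 2) none = rest.drop 1 := by
        cases rest <;> simp [PySem.List.slice]
      rw [h2, h3, ← String.append_assoc, pvChunks]
      exact ih b (c + 2) (by simp at h ⊢; omega)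

theorem fold_eq_chunks (l : List Char) (a : String) : ∀ (s : Int), s % 2 = 0 →
    (PySem.List.enumerate l s).foldl
      (fun a p => (if p.1 % 2 == 0 then a ++ "\\x" else a) ++ String.ofList [p.2]) a
    = pvChunks l a := by
  induction l, a using pvChunks.induct with
  | case1 a => intro s _; simp [PySem.List.enumerate, pvChunks]
  | case2 x rest a ih =>
      intro s hs
      have hseq : (s % 2 == 0) = true := by simpa using hs
      cases rest with
      | nil =>
          simp only [PySem.List.enumerate, List.foldl_cons, List.foldl_nil, hseq, ite_true,
            pvChunks, List.drop_nil, List.take_nil]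
      | cons y rest' =>
          have h1 : ((s + 1) % 2 == 0) = false := by simp; omega
          simp only [PySem.List.enumerate, List.foldl_cons, hseq, h1, if_pos,
            Bool.false_eq_true, ite_false]
          rw [pvChunks]
          have hacc : a ++ "\\x" ++ String.ofList [x] ++ String.ofList [y]
              = a ++ "\\x" ++ String.ofList (x :: List.take 1 (y :: rest')) := by
            simp only [List.take_succ_cons, List.take_zero,
              show (x :: [y]) = [x] ++ [y] from rfl, String.ofList_append, String.append_assoc]
          have := ih (s + 1 + 1) (by omega)
          simp only [List.drop_succ_cons, List.drop_zero] at this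
          rw [hacc]
          exact this

-- ===== VERDICT (by name: the statement is the Claim_ definition above) =====
theorem byte_it_spec : Claim_equal_byte_it := by
  intro inp _
  unfold Spec_byte_it byte_it byte_it_alt
  rw [loop_eq_chunks _ _ _ 0 (by simp), fold_eq_chunks _ _ 0 (by omega)]
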